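-- pv_equiv track=rewrite | github.com/EmilioV07/projects | xor/xor.py | brk2
-- ===== SOURCE A (Python) =====
-- def brk2(bytelines, keysizes): #second brk function specifically made to break based on top 3 keysizes
-- 	chunklist1 = []
-- 	chunklist2 = []
-- 	chunklist3 = []
-- 	pieceslist1 = [[] for _ in range(keysizes[0])] #PIECESLIST: List of broken segments AFTER transposing, (1,1,1) (2,2,2), etc...
-- 	pieceslist2 = [[] for _ in range(keysizes[1])]
-- 	pieceslist3 = [[] for _ in range(keysizes[2])]
-- 	for j in range(0,len(bytelines), keysizes[0]):
-- 		chunklist1.append(bytelines[j:j+keysizes[0]])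
-- 	for j in range(0,len(bytelines), keysizes[1]):
-- 		chunklist2.append(bytelines[j:j+keysizes[1]])
-- 	for j in range(0,len(bytelines), keysizes[2]):
-- 		chunklist3.append(bytelines[j:j+keysizes[2]])
-- 	for chunk in chunklist1:
-- 		for index in range(len(chunk)):
-- 			pieceslist1[index].append(chunk[index])
-- 	for chunk in chunklist2:
-- 		for index in range(len(chunk)):
-- 			pieceslist2[index].append(chunk[index])
-- 	for chunk in chunklist3:
-- 		for index in range(len(chunk)):
-- 			pieceslist3[index].append(chunk[index])
-- 	return pieceslist1, pieceslist2, pieceslist3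
-- ===== SOURCE B (Python) =====
-- def brk2(bytelines, keysizes):
-- 	# Column j of the keysize-k transpose is exactly the stride slice
-- 	# bytelines[j::k]: no chunk lists, no nested transpose loops, no appends.
-- 	def cols(k):
-- 		return [bytelines[j::k] for j in range(k)]
-- 	return cols(keysizes[0]), cols(keysizes[1]), cols(keysizes[2])
-- ===== Notes on version B (the rewrite author's own statement) =====
-- stated objective: simpler
-- what changed: B replaces A's chunk-then-transpose passes (three chunklist builds plus nested index loops appending into pieceslists) by a list of stride slices: column j for keysize k is simply bytelines[j::k].
import Mathlib
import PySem

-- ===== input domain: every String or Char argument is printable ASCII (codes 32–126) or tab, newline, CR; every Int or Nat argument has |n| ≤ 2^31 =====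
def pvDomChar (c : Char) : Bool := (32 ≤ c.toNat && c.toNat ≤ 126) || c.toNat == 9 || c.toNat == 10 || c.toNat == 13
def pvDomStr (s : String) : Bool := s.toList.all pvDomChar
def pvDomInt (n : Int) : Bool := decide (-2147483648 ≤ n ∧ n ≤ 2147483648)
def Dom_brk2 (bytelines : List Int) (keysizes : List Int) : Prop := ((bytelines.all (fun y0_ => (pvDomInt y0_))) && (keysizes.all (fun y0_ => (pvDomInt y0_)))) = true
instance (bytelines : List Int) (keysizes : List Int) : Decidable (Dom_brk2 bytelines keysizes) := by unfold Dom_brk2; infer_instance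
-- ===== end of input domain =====

-- ===== PORT A =====
-- B replaces A's chunk-then-transpose passes by one stride slice bytelines[j::k]
-- per column (objective: simpler).
-- A repeats identical code for keysizes[0], keysizes[1], keysizes[2]; the repeated block
-- is transliterated once as brkPieceA and applied three times.
-- pieceslist[index] read/write and chunk[index] are in range whenever the keysize is
-- positive, so List.set / List.getD are exact there (for a negative keysize every loop
-- body is dead: both ranges are empty).
def brkPieceA (bytelines : List Int) (k : Int) : List (List Int) :=
  -- pieceslist = [[] for _ in range(k)]
  let pieceslist : List (List Int) := (PySem.List.pyRange 0 k 1).map (fun _ => ([] : List Int))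
  -- for j in range(0, len(bytelines), k): chunklist.append(bytelines[j:j+k])
  let chunklist : List (List Int) :=
    (PySem.List.pyRange 0 (bytelines.length : Int) k).foldl
      (fun acc j => acc ++ [PySem.List.slice bytelines (some j) (some (j + k))]) []
  -- for chunk in chunklist: for index in range(len(chunk)): pieceslist[index].append(chunk[index])
  chunklist.foldl
    (fun pieces chunk =>
      (List.range chunk.length).foldl
        (fun pieces index => pieces.set index (pieces.getD index [] ++ [chunk.getD index 0]))
        pieces)
    pieceslist

def brk2 (bytelines : List Int) (keysizes : List Int) : List (List Int) × List (List Int) × List (List Int) :=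
  (brkPieceA bytelines (PySem.List.pyGetD keysizes 0 0),
   brkPieceA bytelines (PySem.List.pyGetD keysizes 1 0),
   brkPieceA bytelines (PySem.List.pyGetD keysizes 2 0))

-- ===== PORT B =====
-- cols(k) = [bytelines[j::k] for j in range(k)]; slice? is total for step ≠ 0, and every
-- j drawn from range(k) has k ≠ 0, so .getD [] never supplies its default.
def brkColsB (bytelines : List Int) (k : Int) : List (List Int) :=
  (PySem.List.pyRange 0 k 1).map
    (fun j => (PySem.List.slice? bytelines (some j) none k).getD [])

def brk2_alt (bytelines : List Int) (keysizes : List Int) : List (List Int) × List (List Int) × List (List Int) :=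
  (brkColsB bytelines (PySem.List.pyGetD keysizes 0 0),
   brkColsB bytelines (PySem.List.pyGetD keysizes 1 0),
   brkColsB bytelines (PySem.List.pyGetD keysizes 2 0))

-- ===== PRECONDITION & SPEC =====
-- Pre_ excludes exactly the inputs on which A raises: keysize lists shorter than 3
-- (IndexError on keysizes[2]) and a zero among the first three keysizes
-- (ValueError from range(0, len, 0)).
def Pre_brk2 (bytelines : List Int) (keysizes : List Int) : Prop :=
  3 ≤ keysizes.length ∧ ∀ k, k ∈ keysizes.take 3 → k ≠ 0
instance (bytelines : List Int) (keysizes : List Int) : Decidable (Pre_brk2 bytelines keysizes) := by unfold Pre_brk2; infer_instance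
def pvWitness_brk2 : List Int × List Int := ([1, 2, 3, 4, 5], [2, 3, 4])
def Spec_brk2 (bytelines : List Int) (keysizes : List Int) (out : List (List Int) × List (List Int) × List (List Int)) : Prop := out = brk2_alt bytelines keysizes
instance (bytelines : List Int) (keysizes : List Int) (out : List (List Int) × List (List Int) × List (List Int)) : Decidable (Spec_brk2 bytelines keysizes out) := by unfold Spec_brk2; infer_instance

-- ===== CLAIM (what is proved, stated in full; the proofs are below) =====
def Claim_equal_brk2 : Prop := ∀ (bytelines : List Int) (keysizes : List Int), Dom_brk2 bytelines keysizes → Pre_brk2 bytelines keysizes → Spec_brk2 bytelines keysizes (brk2 bytelines keysizes)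

-- ===== LEMMAS AND PROOFS =====

-- chunks of size m+1, structurally
def chunksS (m : Nat) : List Int → List (List Int)
  | [] => []
  | b :: bs => (b :: bs.take m) :: chunksS m (bs.drop m)
termination_by l => l.length
decreasing_by simp [List.length_drop]

-- the transpose of one chunk: append the element at offset j within the chunk to column j
def innerGo : List Int → Nat → List (List Int) → List (List Int)
  | [], _, p => p
  | b :: bs, j, p => innerGo bs (j + 1) (p.set j (p.getD j [] ++ [b]))

-- every (m+1)-th element, structurally (the stride bl[::m+1])
def strideS (m : Nat) : List Int → List Int
  | [] => []
  | b :: bs => b :: strideS m (bs.drop m)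
termination_by l => l.length
decreasing_by simp [List.length_drop]

lemma chunksS_nil (m : Nat) : chunksS m [] = [] := by rw [chunksS]

lemma chunksS_cons (m : Nat) (b : Int) (bs : List Int) :
    chunksS m (b :: bs) = (b :: bs.take m) :: chunksS m (bs.drop m) := by rw [chunksS]

lemma strideS_nil (m : Nat) : strideS m [] = [] := by rw [strideS]

lemma strideS_cons (m : Nat) (b : Int) (bs : List Int) :
    strideS m (b :: bs) = b :: strideS m (bs.drop m) := by rw [strideS]

lemma inner_foldl (c : List Int) : ∀ (off : Nat) (p : List (List Int)),
    (List.range c.length).foldl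
      (fun p idx => p.set (off + idx) (p.getD (off + idx) [] ++ [c.getD idx 0])) p
    = innerGo c off p := by
  induction c with
  | nil => intro off p; simp [innerGo]
  | cons b bs ih =>
      intro off p
      rw [List.length_cons, List.range_succ_eq_map]
      simp only [List.foldl_cons, List.foldl_map, List.getD_cons_zero, List.getD_cons_succ,
        Nat.add_zero]
      simp only [innerGo]
      rw [← ih (off + 1) (p.set off (p.getD off [] ++ [b]))]
      apply List.foldl_ext
      intro p' idx _
      have h1 : off + (idx + 1) = off + 1 + idx := by omega
      rw [h1]

lemma inner_foldl0 (c : List Int) (p : List (List Int)) :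
    (List.range c.length).foldl
      (fun p idx => p.set idx (p.getD idx [] ++ [c.getD idx 0])) p
    = innerGo c 0 p := by
  have := inner_foldl c 0 p
  simpa using this

lemma innerGo_length (c : List Int) : ∀ (off : Nat) (p : List (List Int)),
    (innerGo c off p).length = p.length := by
  induction c with
  | nil => intro off p; simp [innerGo]
  | cons b bs ih => intro off p; simp [innerGo, ih]

lemma innerGo_getD (c : List Int) : ∀ (off : Nat) (p : List (List Int)) (j : Nat),
    (innerGo c off p).getD j []
    = if off ≤ j ∧ j - off < c.length ∧ j < p.length
      then p.getD j [] ++ [c.getD (j - off) 0] else p.getD j [] := by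
  induction c with
  | nil =>
      intro off p j
      simp only [innerGo, List.length_nil]
      split_ifs with h
      · exact absurd h.2.1 (by omega)
      · rfl
  | cons b bs ih =>
      intro off p j
      simp only [innerGo, List.length_cons]
      rw [ih (off + 1) _ j, List.length_set]
      by_cases hoj : off = j
      · subst hoj
        rw [if_neg (by omega)]
        by_cases hlen : off < p.length
        · rw [if_pos ⟨le_rfl, by omega, hlen⟩, List.getD_eq_getElem?_getD,
            List.getElem?_set, if_pos rfl, if_pos hlen, Nat.sub_self, List.getD_cons_zero]
          rfl
        · rw [if_neg (by intro h; exact hlen h.2.2), List.getD_eq_getElem?_getD,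
            List.getElem?_set, if_pos rfl, if_neg hlen,
            List.getD_eq_getElem?_getD (l := p), List.getElem?_eq_none (by omega)]
      · have hset : (p.set off (p.getD off [] ++ [b])).getD j [] = p.getD j [] := by
          rw [List.getD_eq_getElem?_getD, List.getElem?_set, if_neg hoj,
            ← List.getD_eq_getElem?_getD]
        by_cases h1 : off + 1 ≤ j ∧ j - (off + 1) < bs.length ∧ j < p.length
        · rw [if_pos h1, if_pos (⟨by omega, by omega, h1.2.2⟩ :
            off ≤ j ∧ j - off < bs.length + 1 ∧ j < p.length), hset,
            show j - off = (j - (off + 1)) + 1 by omega, List.getD_cons_succ]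
        · rw [if_neg h1, if_neg (by
            intro h
            exact h1 ⟨by omega, by omega, h.2.2⟩), hset]

-- p is recovered by reading itself back column by column
lemma self_eq_map_range (p : List (List Int)) :
    (List.range p.length).map (fun j => p.getD j []) = p := by
  apply List.ext_getElem
  · simp
  · intro i h1 h2
    simp [List.getD_eq_getElem?_getD, List.getElem?_eq_getElem h2]

-- folding the chunk transpose = appending the stride columns
lemma chunks_cols (m : Nat) : ∀ (n : Nat) (bl : List Int), bl.length ≤ n →
    ∀ (p : List (List Int)), p.length = m + 1 →
    (chunksS m bl).foldl (fun p c => innerGo c 0 p) p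
    = (List.range (m + 1)).map (fun j => p.getD j [] ++ strideS m (bl.drop j)) := by
  intro n
  induction n with
  | zero =>
      intro bl hbl p hp
      have hnil : bl = [] := List.eq_nil_of_length_eq_zero (by omega)
      subst hnil
      simp only [chunksS_nil, List.foldl_nil, List.drop_nil, strideS_nil, List.append_nil]
      rw [← hp, self_eq_map_range]
  | succ n ih =>
      intro bl hbl p hp
      cases bl with
      | nil =>
          simp only [chunksS_nil, List.foldl_nil, List.drop_nil, strideS_nil, List.append_nil]
          rw [← hp, self_eq_map_range]
      | cons b bs =>
          rw [chunksS_cons, List.foldl_cons,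
            ih (bs.drop m) (by simp [List.length_drop] at *; omega) _
              (by rw [innerGo_length]; exact hp)]
          apply List.map_congr_left
          intro j hj
          rw [List.mem_range] at hj
          rw [innerGo_getD]
          by_cases hjc : j < (b :: bs.take m).length
          · have hjbl : j < (b :: bs).length := by
              simp only [List.length_cons, List.length_take] at hjc ⊢; omega
            rw [if_pos ⟨Nat.zero_le j, by omega, by omega⟩]
            rw [List.drop_eq_getElem_cons hjbl, strideS_cons]
            have hdd : List.drop m (List.drop (j + 1) (b :: bs)) = List.drop j (List.drop m bs) := by
              rw [List.drop_drop, List.drop_drop, show j + 1 + m = (m + j) + 1 by omega,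
                List.drop_succ_cons]
            rw [hdd]
            have hget : (b :: bs.take m).getD (j - 0) 0 = (b :: bs)[j] := by
              rw [Nat.sub_zero,
                show (b :: bs.take m) = (b :: bs).take (m + 1) by rw [List.take_succ_cons],
                List.getD_eq_getElem?_getD, List.getElem?_take_of_lt (by omega),
                List.getElem?_eq_getElem hjbl]
              rfl
            rw [hget]
            simp
          · have hge : bs.length + 1 ≤ j := by
              simp only [List.length_cons, List.length_take] at hjc; omega
            rw [if_neg (by intro h; exact hjc (by omega))]
            rw [List.drop_eq_nil_of_le (show (b :: bs).length ≤ j by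
                simp only [List.length_cons]; omega),
              List.drop_eq_nil_of_le (show (bs.drop m).length ≤ j by
                simp only [List.length_drop]; omega)]

-- A's chunklist (built by slicing at strides of k = m+1) IS chunksS m
lemma chunks_map_eq (m : Nat) : ∀ (n : Nat) (bl : List Int), bl.length ≤ n →
    (List.range ((bl.length + m) / (m + 1))).map
      (fun t => (bl.drop ((m + 1) * t)).take (m + 1)) = chunksS m bl := by
  intro n
  induction n with
  | zero =>
      intro bl hbl
      have hnil : bl = [] := List.eq_nil_of_length_eq_zero (by omega)
      subst hnil
      simp [chunksS_nil, Nat.div_eq_of_lt (by omega : m < m + 1)]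
  | succ n ih =>
      intro bl hbl
      cases bl with
      | nil => simp [chunksS_nil, Nat.div_eq_of_lt (by omega : m < m + 1)]
      | cons b bs =>
          have hdl : (bs.drop m).length = bs.length - m := by simp [List.length_drop]
          have hq : ((b :: bs).length + m) / (m + 1)
              = ((bs.drop m).length + m) / (m + 1) + 1 := by
            simp only [List.length_cons, hdl]
            rcases Nat.lt_or_ge (bs.length + 1) (m + 1) with hlt | hle
            · have h1 : bs.length - m = 0 := by omega
              rw [h1, Nat.zero_add, Nat.div_eq_of_lt (by omega : m < m + 1)]
              rw [show bs.length + 1 + m = bs.length + (m + 1) by omega,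
                Nat.add_div_right _ (Nat.succ_pos m),
                Nat.div_eq_of_lt (by omega : bs.length < m + 1)]
            · have h2 : bs.length + 1 + m = ((bs.length - m) + m) + (m + 1) := by omega
              rw [h2, Nat.add_div_right _ (Nat.succ_pos m)]
          rw [hq, List.range_succ_eq_map, chunksS_cons]
          rw [List.map_cons, List.map_map]
          refine congrArg₂ List.cons ?_ ?_
          · simp
          · rw [← ih (bs.drop m) (by simp [List.length_drop] at *; omega)]
            apply List.map_congr_left
            intro t _
            simp only [Function.comp_apply]
            rw [show (m + 1) * (t + 1) = (m + 1) + (m + 1) * t by ring, ← List.drop_drop]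
            simp

lemma chunklistA_eq (bl : List Int) (m : Nat) :
    (PySem.List.pyRange 0 (bl.length : Int) ((m : Int) + 1)).foldl
      (fun acc j => acc ++ [PySem.List.slice bl (some j) (some (j + ((m : Int) + 1)))]) []
    = chunksS m bl := by
  rw [PySem.List.foldl_append_singleton_eq_map]
  rw [PySem.List.pyRange_of_pos 0 (bl.length : Int) (by omega : (0 : Int) < (m : Int) + 1)]
  simp only [List.nil_append, List.map_map]
  have hcount : (if (0 : Int) < (bl.length : Int) then
        (((bl.length : Int) - 0 + ((m : Int) + 1) - 1) / ((m : Int) + 1)).toNat else 0)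
      = (bl.length + m) / (m + 1) := by
    split_ifs with h
    · have h1 : ((bl.length : Int) - 0 + ((m : Int) + 1) - 1) = ((bl.length + m : Nat) : Int) := by
        push_cast; ring
      have h2 : ((m : Int) + 1) = (((m + 1 : Nat)) : Int) := by push_cast; ring
      rw [h1, h2]
      norm_cast
    · have h0 : bl.length = 0 := by omega
      rw [h0, Nat.zero_add, Nat.div_eq_of_lt (by omega : m < m + 1)]
  rw [hcount, ← chunks_map_eq m bl.length bl le_rfl]
  apply List.map_congr_left
  intro t _
  simp only [Function.comp_apply]
  have e1 : (0 : Int) + ((m : Int) + 1) * (t : Int) = (((m + 1) * t : Nat) : Int) := by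
    push_cast; ring
  have e3 : ((m : Int) + 1) = (((m + 1) : Nat) : Int) := by push_cast; ring
  rw [e1, e3]
  exact PySem.List.slice_natCast_add bl ((m + 1) * t) (m + 1)

lemma getD_map_const (l : List Int) (j : Nat) :
    (l.map (fun _ => ([] : List Int))).getD j [] = [] := by
  rw [List.getD_eq_getElem?_getD]
  rcases h : (l.map (fun _ => ([] : List Int)))[j]? with _ | v
  · rfl
  · have := List.mem_of_getElem? h
    simp at this
    simp [this]

-- A's piece builder computes exactly the stride columns
lemma brkPieceA_cols (bl : List Int) (m : Nat) :
    brkPieceA bl ((m : Int) + 1)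
    = (List.range (m + 1)).map (fun j => strideS m (bl.drop j)) := by
  unfold brkPieceA
  rw [chunklistA_eq]
  have hfold : ∀ (cs : List (List Int)) (p : List (List Int)),
      cs.foldl (fun pieces chunk =>
        (List.range chunk.length).foldl
          (fun pieces index => pieces.set index (pieces.getD index [] ++ [chunk.getD index 0]))
          pieces) p
      = cs.foldl (fun p c => innerGo c 0 p) p := by
    intro cs
    induction cs with
    | nil => intro p; simp
    | cons c cs ihc =>
        intro p
        rw [List.foldl_cons, List.foldl_cons, inner_foldl0]
        exact ihc _
  rw [hfold]
  have hinit : ((PySem.List.pyRange 0 ((m : Int) + 1) 1).map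
      (fun _ => ([] : List Int))).length = m + 1 := by
    rw [List.length_map, PySem.List.length_pyRange_one]
    omega
  rw [chunks_cols m bl.length bl le_rfl _ hinit]
  apply List.map_congr_left
  intro j _
  rw [getD_map_const, List.nil_append]

-- the stride as an index map: element t of bl[j::m+1] is bl[j + (m+1)*t]
lemma strideS_eq_map (m : Nat) (bl : List Int) : ∀ (d j : Nat), bl.length - j ≤ d →
    strideS m (bl.drop j)
    = (List.range ((bl.length - j + m) / (m + 1))).map
        (fun t => bl.getD (j + (m + 1) * t) 0) := by
  intro d
  induction d with
  | zero =>
      intro j hj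
      have hle : bl.length ≤ j := by omega
      rw [List.drop_eq_nil_of_le hle, strideS_nil,
        show bl.length - j = 0 by omega, Nat.zero_add,
        Nat.div_eq_of_lt (by omega : m < m + 1)]
      rfl
  | succ d ihd =>
      intro j hj
      rcases Nat.lt_or_ge j bl.length with hlt | hge
      · have hdropc : bl.drop j = bl[j] :: bl.drop (j + 1) :=
          List.drop_eq_getElem_cons hlt
        rw [hdropc, strideS_cons, List.drop_drop,
          show j + 1 + m = j + m + 1 by omega]
        have hq : (bl.length - j + m) / (m + 1)
            = (bl.length - (j + m + 1) + m) / (m + 1) + 1 := by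
          rcases Nat.lt_or_ge bl.length (j + m + 1) with h1 | h2
          · rw [show bl.length - (j + m + 1) = 0 by omega, Nat.zero_add,
              Nat.div_eq_of_lt (by omega : m < m + 1)]
            have := Nat.div_eq_of_lt_le
              (by omega : 1 * (m + 1) ≤ bl.length - j + m)
              (by omega : bl.length - j + m < (1 + 1) * (m + 1))
            omega
          · rw [show bl.length - j + m = (bl.length - (j + m + 1) + m) + (m + 1) by omega,
              Nat.add_div_right _ (Nat.succ_pos m)]
        rw [hq, List.range_succ_eq_map, List.map_cons, List.map_map]
        refine congrArg₂ List.cons ?_ ?_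
        · rw [Nat.mul_zero, Nat.add_zero, List.getD_eq_getElem?_getD,
            List.getElem?_eq_getElem hlt]
          rfl
        · rw [ihd (j + m + 1) (by omega)]
          apply List.map_congr_left
          intro t _
          simp only [Function.comp_apply]
          have : j + (m + 1) * (t + 1) = j + m + 1 + (m + 1) * t := by ring
          rw [this]
      · rw [List.drop_eq_nil_of_le hge, strideS_nil,
          show bl.length - j = 0 by omega, Nat.zero_add,
          Nat.div_eq_of_lt (by omega : m < m + 1)]
        rfl

lemma filterMap_some_of {α : Type} (l : List Nat) (f : Nat → Option α) (g : Nat → α)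
    (h : ∀ t ∈ l, f t = some (g t)) : l.filterMap f = l.map g := by
  induction l with
  | nil => rfl
  | cons x xs ih =>
      rw [List.filterMap_cons, h x List.mem_cons_self, List.map_cons,
        ih (fun t ht => h t (List.mem_cons_of_mem x ht))]

-- the Python slice bl[j::k] (k = m+1 > 0, j ≥ 0) is the stride of the drop
lemma slice?_stride (bl : List Int) (m j : Nat) :
    PySem.List.slice? bl (some (j : Int)) none ((m : Int) + 1)
    = some (strideS m (bl.drop j)) := by
  unfold PySem.List.slice? PySem.List.sliceIndices
  rw [if_neg (by omega : ¬ ((m : Int) + 1 = 0))]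
  simp only [if_neg (by omega : ¬ ((m : Int) + 1 < 0)),
    if_neg (by omega : ¬ ((j : Int) < 0)), if_pos (by omega : (0 : Int) < (m : Int) + 1)]
  rcases Nat.lt_or_ge j bl.length with hlt | hge
  · have hstart : min (j : Int) (bl.length : Int) = (j : Int) := by
      rw [min_eq_left]; exact_mod_cast Nat.le_of_lt hlt
    rw [hstart, if_pos (by exact_mod_cast hlt)]
    have hcnt : (((bl.length : Int) - (j : Int) + ((m : Int) + 1) - 1) / ((m : Int) + 1)).toNat
        = (bl.length - j + m) / (m + 1) := by
      have h1 : ((bl.length : Int) - (j : Int) + ((m : Int) + 1) - 1)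
          = ((bl.length - j + m : Nat) : Int) := by
        push_cast [Nat.cast_sub (Nat.le_of_lt hlt)]; ring
      have h2 : ((m : Int) + 1) = (((m + 1 : Nat)) : Int) := by push_cast; ring
      rw [h1, h2, ← Int.natCast_div, Int.toNat_natCast]
    rw [hcnt]
    congr 1
    rw [strideS_eq_map m bl (bl.length - j) j le_rfl]
    apply filterMap_some_of
    intro t ht
    rw [List.mem_range] at ht
    have hidx : (((j : Int) + ((m : Int) + 1) * (t : Int)).toNat) = j + (m + 1) * t := by
      have : ((j : Int) + ((m : Int) + 1) * (t : Int)) = ((j + (m + 1) * t : Nat) : Int) := by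
        push_cast; ring
      rw [this, Int.toNat_natCast]
    have hmul : (m + 1) * ((bl.length - j + m) / (m + 1)) ≤ bl.length - j + m :=
      Nat.mul_div_le _ _
    have ht' : t + 1 ≤ (bl.length - j + m) / (m + 1) := ht
    have hmul2 : (m + 1) * (t + 1) ≤ (m + 1) * ((bl.length - j + m) / (m + 1)) :=
      Nat.mul_le_mul_left _ ht'
    have e1 : (m + 1) * (t + 1) = (m + 1) * t + (m + 1) := by ring
    have hin : j + (m + 1) * t < bl.length := by omega
    rw [hidx, List.getElem?_eq_getElem hin, List.getD_eq_getElem?_getD,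
      List.getElem?_eq_getElem hin]
    rfl
  · have hstart : min (j : Int) (bl.length : Int) = (bl.length : Int) := by
      rw [min_eq_right]; exact_mod_cast hge
    rw [hstart, if_neg (by omega : ¬ ((bl.length : Int) < (bl.length : Int)))]
    rw [List.drop_eq_nil_of_le hge, strideS_nil]
    rfl

-- negative keysize: every range in both programs is empty
lemma pyRange_neg_empty (len : Int) (k : Int) (hlen : 0 ≤ len) (hk : k < 0) :
    PySem.List.pyRange 0 len k = [] := by
  unfold PySem.List.pyRange
  rw [if_neg (by omega : ¬ (k = 0))]
  simp only [if_neg (by omega : ¬ ((0 : Int) < k)), if_neg (by omega : ¬ (len < 0))]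
  rfl

lemma piece_eq (bl : List Int) (k : Int) (hk : k ≠ 0) : brkPieceA bl k = brkColsB bl k := by
  rcases lt_or_gt_of_ne hk with hneg | hpos
  · unfold brkPieceA brkColsB
    rw [PySem.List.pyRange_one_eq_nil (by omega : k ≤ 0),
      pyRange_neg_empty (bl.length : Int) k (by exact_mod_cast Nat.zero_le _) hneg]
    rfl
  · obtain ⟨m, rfl⟩ : ∃ m : Nat, k = (m : Int) + 1 := ⟨(k.toNat - 1), by omega⟩
    rw [brkPieceA_cols]
    unfold brkColsB
    rw [PySem.List.pyRange_one, show (((m : Int) + 1) - 0).toNat = m + 1 by omega, List.map_map]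
    apply List.map_congr_left
    intro j _
    simp only [Function.comp_apply, zero_add]
    rw [slice?_stride]
    rfl

lemma pyGetD_ne_zero (ks : List Int) (h3 : 3 ≤ ks.length)
    (hp : ∀ k, k ∈ ks.take 3 → k ≠ 0) (i : Nat) (hi : i < 3) :
    PySem.List.pyGetD ks (i : Int) 0 ≠ 0 := by
  have hlen : (i : Int) < (ks.length : Int) := by exact_mod_cast lt_of_lt_of_le hi h3
  rw [PySem.List.pyGetD_eq_getElem ks 0 (by exact_mod_cast Nat.zero_le i) hlen]
  apply hp
  have hi' : i < (ks.take 3).length := by simp [List.length_take]; omega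
  have hg : (ks.take 3)[i]'hi' = ks[(i : Int).toNat]'(by simpa using lt_of_lt_of_le hi h3) := by
    simp [List.getElem_take]
  rw [← hg]
  exact List.getElem_mem hi'

-- ===== VERDICT (by name: the statement is the Claim_ definition above) =====
theorem brk2_spec : Claim_equal_brk2 := by
  intro bl ks _ hpre
  obtain ⟨h3, hp⟩ := hpre
  unfold Spec_brk2 brk2 brk2_alt
  have h0 : PySem.List.pyGetD ks 0 0 ≠ 0 := by
    have := pyGetD_ne_zero ks h3 hp 0 (by omega); simpa using this
  have h1 : PySem.List.pyGetD ks 1 0 ≠ 0 := by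
    have := pyGetD_ne_zero ks h3 hp 1 (by omega); simpa using this
  have h2 : PySem.List.pyGetD ks 2 0 ≠ 0 := by
    have := pyGetD_ne_zero ks h3 hp 2 (by omega); simpa using this
  rw [piece_eq bl _ h0, piece_eq bl _ h1, piece_eq bl _ h2]
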